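-- pv_equiv track=rewrite | github.com/workflowautomationcc/pdf_form_fillout-telegram | test_matcher.py | words_consumed
-- ===== SOURCE A (Python) =====
-- def words_consumed(words, box_compact, word_idx):
--     accumulated = ""
--     last_match = 0
--     for i in range(word_idx, len(words)):
--         accumulated += words[i]
--         if accumulated in box_compact:
--             last_match = i - word_idx + 1
--     return last_match
-- ===== SOURCE B (Python) =====
-- def words_consumed(words, box_compact, word_idx):
--     # Binary search the largest k such that the concatenation of the first k
--     # words of words[word_idx:] occurs in box_compact (the predicate is
--     # monotone in k: a prefix of a substring is a substring).
--     tail = [words[i] for i in range(word_idx, len(words))]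
--     lo, hi = 0, len(tail)
--     while lo < hi:
--         mid = (lo + hi + 1) // 2
--         if "".join(tail[:mid]) in box_compact:
--             lo = mid
--         else:
--             hi = mid - 1
--     return lo
-- ===== Notes on version B (the rewrite author's own statement) =====
-- stated objective: faster
-- what changed: Replaces A's linear scan that concatenates and substring-tests every prefix of words[word_idx:] by a binary search on the number of consumed words, exploiting that 'the concatenation of the first k words occurs in box_compact' is monotone in k (a prefix of a substring is a substring).
import Mathlib
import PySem

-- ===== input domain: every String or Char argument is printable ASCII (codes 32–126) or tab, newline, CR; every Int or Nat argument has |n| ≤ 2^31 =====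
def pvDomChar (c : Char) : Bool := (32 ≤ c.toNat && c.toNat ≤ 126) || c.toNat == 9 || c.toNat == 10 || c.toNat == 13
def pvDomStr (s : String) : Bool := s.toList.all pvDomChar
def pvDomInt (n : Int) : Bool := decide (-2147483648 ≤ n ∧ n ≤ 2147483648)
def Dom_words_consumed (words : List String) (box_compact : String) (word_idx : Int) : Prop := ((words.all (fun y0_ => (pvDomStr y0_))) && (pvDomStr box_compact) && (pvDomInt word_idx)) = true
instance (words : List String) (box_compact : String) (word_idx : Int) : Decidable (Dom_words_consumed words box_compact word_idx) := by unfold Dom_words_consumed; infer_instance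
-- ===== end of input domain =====

-- B replaces A's linear scan over all suffix prefixes by a binary search on the
-- number of consumed words (the "prefix occurs in box_compact" predicate is
-- monotone in that number); objective: faster.

-- ===== PORT A =====
-- strings are handled on the List Char side (PySem.Chars), exact for Python's
-- str concatenation and the 'in' containment test
def words_consumed (words : List String) (box_compact : String) (word_idx : Int) : Int :=
  (((PySem.List.pyRange word_idx (PySem.List.len words)).foldl
      (fun (st : List Char × Int) i =>
        let accumulated := st.1 ++ (PySem.List.pyGetD words i "").toList
        if PySem.Chars.isIn accumulated box_compact.toList then
          (accumulated, i - word_idx + 1)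
        else
          (accumulated, st.2))
      ([], 0)).2)

-- ===== PORT B =====
-- the while loop of Source B: lo/hi binary search for the largest matching k
def wcBsearchGo (tail : List String) (box : List Char) (lo hi : Nat) : Nat :=
  if h : lo < hi then
    let mid := (lo + hi + 1) / 2
    if PySem.Chars.isIn (PySem.Chars.join [] ((tail.take mid).map String.toList)) box then
      wcBsearchGo tail box mid hi
    else
      wcBsearchGo tail box lo (mid - 1)
  else lo
termination_by hi - lo
decreasing_by all_goals omega

def words_consumed_alt (words : List String) (box_compact : String) (word_idx : Int) : Int :=
  let tail := (PySem.List.pyRange word_idx (PySem.List.len words)).map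
    (fun i => PySem.List.pyGetD words i "")
  (wcBsearchGo tail box_compact.toList 0 tail.length : Int)

-- ===== PRECONDITION & SPEC =====
-- Pre_ excludes exactly the inputs on which Python A raises IndexError:
-- word_idx < -len(words) makes words[i] raise on the first loop iteration.
def Pre_words_consumed (words : List String) (box_compact : String) (word_idx : Int) : Prop :=
  -(words.length : Int) ≤ word_idx
instance (words : List String) (box_compact : String) (word_idx : Int) : Decidable (Pre_words_consumed words box_compact word_idx) := by unfold Pre_words_consumed; infer_instance
def pvWitness_words_consumed : List String × String × Int := (["ab", "c"], "xabcx", 0)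
def Spec_words_consumed (words : List String) (box_compact : String) (word_idx : Int) (out : Int) : Prop := out = words_consumed_alt words box_compact word_idx
instance (words : List String) (box_compact : String) (word_idx : Int) (out : Int) : Decidable (Spec_words_consumed words box_compact word_idx out) := by unfold Spec_words_consumed; infer_instance

-- ===== CLAIM (what is proved, stated in full; the proofs are below) =====
def Claim_equal_words_consumed : Prop := ∀ (words : List String) (box_compact : String) (word_idx : Int), Dom_words_consumed words box_compact word_idx → Pre_words_consumed words box_compact word_idx → Spec_words_consumed words box_compact word_idx (words_consumed words box_compact word_idx)

-- ===== LEMMAS AND PROOFS =====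

-- the concatenation of the first k words of ws
def wcF (ws : List String) (k : Nat) : List Char :=
  PySem.Chars.join [] ((ws.take k).map String.toList)

-- the value A's loop leaves in last_match after k iterations over ws
def wcM (box : List Char) (ws : List String) : Nat → Nat
  | 0 => 0
  | k + 1 => if PySem.Chars.isIn (wcF ws (k + 1)) box then k + 1 else wcM box ws k

lemma wcJoin_eq_flatten (l : List (List Char)) : PySem.Chars.join [] l = l.flatten := by
  show List.intercalate [] l = l.flatten
  induction l with
  | nil => rfl
  | cons x xs ih =>
    cases xs with
    | nil => simp [List.intercalate]
    | cons y ys =>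
      simp only [List.intercalate, List.intersperse] at ih ⊢
      simp_all

lemma wcF_mono (box : List Char) (ws : List String) {i j : Nat} (hij : i ≤ j)
    (hj : PySem.Chars.isIn (wcF ws j) box = true) :
    PySem.Chars.isIn (wcF ws i) box = true := by
  rw [PySem.Chars.isIn_iff_infix] at hj ⊢
  refine List.IsInfix.trans (List.IsPrefix.isInfix ?_) hj
  unfold wcF
  rw [wcJoin_eq_flatten, wcJoin_eq_flatten]
  refine List.IsPrefix.flatten (List.IsPrefix.map _ ?_)
  have : ws.take i = (ws.take j).take i := by
    rw [List.take_take, Nat.min_eq_left hij]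
  rw [this]
  exact List.take_prefix _ _

lemma wcF_zero (ws : List String) : wcF ws 0 = [] := rfl

lemma wc_pred_zero (box : List Char) (ws : List String) :
    PySem.Chars.isIn (wcF ws 0) box = true := by
  rw [wcF_zero, PySem.Chars.isIn_iff_infix]
  exact List.nil_infix

lemma wcM_le (box : List Char) (ws : List String) (k : Nat) : wcM box ws k ≤ k := by
  induction k with
  | zero => simp [wcM]
  | succ k ih =>
    unfold wcM
    split <;> omega

lemma wcM_pred (box : List Char) (ws : List String) (k : Nat) :
    PySem.Chars.isIn (wcF ws (wcM box ws k)) box = true := by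
  induction k with
  | zero => exact wc_pred_zero box ws
  | succ k ih =>
    unfold wcM
    split
    · assumption
    · exact ih

lemma wcM_max (box : List Char) (ws : List String) (k : Nat) :
    ∀ j ≤ k, PySem.Chars.isIn (wcF ws j) box = true → j ≤ wcM box ws k := by
  induction k with
  | zero => intro j hj _; omega
  | succ k ih =>
    intro j hj hpred
    unfold wcM
    split
    · omega
    · rename_i h
      rcases Nat.lt_or_ge j (k + 1) with hlt | hge
      · exact ih j (by omega) hpred
      · have hj1 : j = k + 1 := by omega
        rw [hj1] at hpred
        exact absurd hpred h

-- A's loop, reformulated over the word list ws and counter j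
lemma loopA (box : List Char) (ws : List String) (m : Nat) (hm : m ≤ ws.length) :
    (List.range m).foldl
      (fun (st : List Char × Int) (j : Nat) =>
        if PySem.Chars.isIn (st.1 ++ (ws.getD j "").toList) box then
          (st.1 ++ (ws.getD j "").toList, (j : Int) + 1)
        else
          (st.1 ++ (ws.getD j "").toList, st.2))
      ([], 0)
    = (wcF ws m, (wcM box ws m : Int)) := by
  induction m with
  | zero => simp [wcF_zero, wcM]
  | succ m ih =>
    rw [List.range_succ, List.foldl_append, ih (by omega)]
    have hcat : wcF ws m ++ (ws.getD m "").toList = wcF ws (m + 1) := by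
      unfold wcF
      rw [wcJoin_eq_flatten, wcJoin_eq_flatten, List.take_add_one]
      have hgm : ws[m]? = some (ws.getD m "") := by
        rw [List.getD_eq_getElem?_getD, List.getElem?_eq_getElem (by omega)]
        simp
      rw [hgm]
      simp
    simp only [List.foldl_cons, List.foldl_nil, hcat]
    by_cases hp : PySem.Chars.isIn (wcF ws (m + 1)) box = true
    · rw [if_pos hp]
      have hM : wcM box ws (m + 1) = m + 1 := by unfold wcM; rw [if_pos hp]
      rw [hM]
      push_cast
      rfl
    · rw [if_neg hp]
      have hM : wcM box ws (m + 1) = wcM box ws m := by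
        conv_lhs => rw [wcM]
        rw [if_neg hp]
      rw [hM]

-- the binary-search loop finds the greatest matching k below its bounds
lemma bsearch_spec (box : List Char) (ws : List String) (m : Nat) :
    ∀ lo hi : Nat, lo ≤ hi → hi ≤ m →
      PySem.Chars.isIn (wcF ws lo) box = true →
      (∀ j ≤ m, PySem.Chars.isIn (wcF ws j) box = true → j ≤ hi) →
      (wcBsearchGo ws box lo hi ≤ hi ∧
        PySem.Chars.isIn (wcF ws (wcBsearchGo ws box lo hi)) box = true ∧
        ∀ j ≤ m, PySem.Chars.isIn (wcF ws j) box = true → j ≤ wcBsearchGo ws box lo hi) := by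
  intro lo hi
  induction lo, hi using wcBsearchGo.induct ws box with
  | case1 lo hi h mid hmatch ih =>
    intro _ hhi hlo hmax
    rw [wcBsearchGo]
    simp only [dif_pos h]
    rw [if_pos hmatch]
    have hrec := ih (by omega) hhi hmatch hmax
    exact ⟨by have := hrec.1; omega, hrec.2.1, hrec.2.2⟩
  | case2 lo hi h mid hmatch ih =>
    intro hle hhi hlo hmax
    rw [wcBsearchGo]
    simp only [dif_pos h]
    rw [if_neg hmatch]
    have hmax' : ∀ j ≤ m, PySem.Chars.isIn (wcF ws j) box = true → j ≤ mid - 1 := by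
      intro j hj hpred
      by_contra hgt
      have hmj : mid ≤ j := by omega
      exact hmatch (wcF_mono box ws hmj hpred)
    have hrec := ih (by omega) (by omega) hlo hmax'
    have hgoal : wcBsearchGo ws box lo ((lo + hi + 1) / 2 - 1) = wcBsearchGo ws box lo (mid - 1) := rfl
    have hmidv : mid = (lo + hi + 1) / 2 := rfl
    rw [hgoal]
    refine ⟨?_, hrec.2.1, hrec.2.2⟩
    have := hrec.1
    omega
  | case3 lo hi h =>
    intro hle hhi hlo hmax
    rw [wcBsearchGo]
    simp only [dif_neg h]
    have hlh : lo = hi := by omega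
    subst hlh
    exact ⟨le_refl _, hlo, hmax⟩

lemma pyRange_one_eq_map_range (a b : Int) :
    PySem.List.pyRange a b = (List.range (b - a).toNat).map (fun j : Nat => a + (j : Int)) := by
  generalize hm : (b - a).toNat = m
  induction m generalizing a with
  | zero =>
    have hba : b ≤ a := by omega
    simp only [List.range_zero, List.map_nil]
    apply List.eq_nil_iff_forall_not_mem.2
    intro x hx
    rw [PySem.List.mem_pyRange_one] at hx
    omega
  | succ m ih =>
    have hab : a < b := by omega
    rw [PySem.List.pyRange_one_cons hab, ih (a + 1) (by omega),
      List.range_succ_eq_map, List.map_cons, List.map_map]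
    congr 1
    · simp
    · apply List.map_congr_left
      intro j _
      simp only [Function.comp_apply, Nat.succ_eq_add_one]
      push_cast
      ring

-- ===== VERDICT (by name: the statement is the Claim_ definition above) =====
theorem words_consumed_spec : Claim_equal_words_consumed := by
  intro words box_compact word_idx _hdom _hpre
  unfold Spec_words_consumed words_consumed words_consumed_alt
  set box := box_compact.toList with hbox
  set m := ((PySem.List.len words) - word_idx).toNat with hm
  have hrange : PySem.List.pyRange word_idx (PySem.List.len words)
      = (List.range m).map (fun j : Nat => word_idx + (j : Int)) :=
    pyRange_one_eq_map_range _ _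
  set tail := (PySem.List.pyRange word_idx (PySem.List.len words)).map
    (fun i => PySem.List.pyGetD words i "") with htail
  have htail' : tail = (List.range m).map
      (fun j : Nat => PySem.List.pyGetD words (word_idx + (j : Int)) "") := by
    rw [htail, hrange, List.map_map]
    rfl
  have hlen : tail.length = m := by rw [htail']; simp
  have hml : m ≤ tail.length := by omega
  -- the A-side fold equals the loopA fold over tail
  have hA : (((List.range m).map (fun j : Nat => word_idx + (j : Int))).foldl
      (fun (st : List Char × Int) i =>
        let accumulated := st.1 ++ (PySem.List.pyGetD words i "").toList
        if PySem.Chars.isIn accumulated box then (accumulated, i - word_idx + 1)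
        else (accumulated, st.2))
      ([], 0))
      = (wcF tail m, (wcM box tail m : Int)) := by
    rw [List.foldl_map]
    rw [← loopA box tail m hml]
    apply PySem.List.foldl_congr_mem
    intro acc j hj
    have hjm : j < m := List.mem_range.1 hj
    have hget : tail.getD j "" = PySem.List.pyGetD words (word_idx + (j : Int)) "" := by
      rw [htail']
      exact PySem.List.getD_map_range _ m j "" hjm
    have harith : word_idx + (j : Int) - word_idx + 1 = (j : Int) + 1 := by ring
    simp only [hget, harith]
  rw [hrange, hA]
  -- the B side computes the same quantity
  have hbs := bsearch_spec box tail m 0 tail.length (by omega) (by omega)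
    (wc_pred_zero box tail)
    (fun j hj _ => by omega)
  have hMle : wcM box tail m ≤ m := wcM_le box tail m
  have h1 : wcBsearchGo tail box 0 tail.length ≤ wcM box tail m :=
    wcM_max box tail m _ (by omega) hbs.2.1
  have h2 : wcM box tail m ≤ wcBsearchGo tail box 0 tail.length :=
    hbs.2.2 _ hMle (wcM_pred box tail m)
  have heq : wcM box tail m = wcBsearchGo tail box 0 tail.length := by omega
  rw [heq]
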